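-- pv_equiv track=rewrite | github.com/fszatkowski/python-test-projects | daftcode/daftcode_python_levelup.py | on_diagonals
-- ===== SOURCE A (Python) =====
-- def on_diagonals(N):
--     numbers = []
--     for R in range(1, N+1):
--         base = (2*R - 1)*(2*R - 1)
--         diff = 2*R - 2
--         numbers.append(base)
--         numbers.append(base - diff)
--         numbers.append(base - 2*diff)
--         numbers.append(base - 3*diff)
--     return set(numbers)
-- ===== SOURCE B (Python) =====
-- def on_diagonals(N):
--     def corner(i):
--         r, j = divmod(i, 4)
--         m = 2 * r + 3          # odd side length of the (r+2)-nd ring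
--         return m * m - j * (m - 1)
--     lead = [1] if N >= 1 else []
--     return set(lead + [corner(i) for i in range(4 * (N - 1))])
-- ===== Notes on version B (the rewrite author's own statement) =====
-- stated objective: alternative
-- what changed: Replaces A's per-ring loop that appends four closed-form corners and dedups with set() by a single flat enumeration over range(4*(N-1)): each flat index i is decoded with divmod(i,4) into a ring and a corner slot and mapped by one closed form, with the center 1 prepended separately.
import Mathlib
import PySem

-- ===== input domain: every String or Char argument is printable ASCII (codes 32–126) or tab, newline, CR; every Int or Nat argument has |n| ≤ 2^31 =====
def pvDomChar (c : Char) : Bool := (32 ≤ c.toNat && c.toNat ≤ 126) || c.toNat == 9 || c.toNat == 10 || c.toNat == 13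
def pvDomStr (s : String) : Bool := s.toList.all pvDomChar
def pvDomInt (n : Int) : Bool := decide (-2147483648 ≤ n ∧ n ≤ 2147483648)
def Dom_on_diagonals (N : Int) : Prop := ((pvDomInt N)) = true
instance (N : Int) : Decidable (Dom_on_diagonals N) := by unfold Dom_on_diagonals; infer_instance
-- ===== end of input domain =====

-- B replaces A's per-ring loop (four appends, then set-dedup) by one flat closed-form
-- enumeration over range(4*(N-1)) with divmod index decoding; same cost, different decomposition.

-- ===== PORT A =====
-- loop body of A: append the four corner values of ring R computed by the closed form
def onDiagStepA (numbers : List Int) (R : Int) : List Int :=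
  let base := (2*R - 1) * (2*R - 1)
  let diff := 2*R - 2
  ((((numbers ++ [base]) ++ [base - diff]) ++ [base - 2*diff]) ++ [base - 3*diff])

def on_diagonals (N : Int) : List Int :=
  let numbers := (PySem.List.pyRange 1 (N+1) 1).foldl onDiagStepA []
  PySem.Set.ofList numbers

-- ===== PORT B =====
-- B's helper corner(i): decode flat index i by divmod(i, 4) into ring slot and corner slot
def onDiagCorner (i : Int) : Int :=
  let r := PySem.Int.floordiv i 4
  let j := PySem.Int.mod i 4
  let m := 2*r + 3
  m*m - j*(m - 1)

def on_diagonals_alt (N : Int) : List Int :=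
  let lead : List Int := if 1 ≤ N then [1] else []
  PySem.Set.ofList (lead ++ (PySem.List.pyRange 0 (4*(N-1)) 1).map onDiagCorner)

-- ===== PRECONDITION & SPEC =====
def Spec_on_diagonals (N : Int) (out : List Int) : Prop := out = on_diagonals_alt N
instance (N : Int) (out : List Int) : Decidable (Spec_on_diagonals N out) := by unfold Spec_on_diagonals; infer_instance

-- ===== CLAIM (what is proved, stated in full; the proofs are below) =====
def Claim_equal_on_diagonals : Prop := ∀ (N : Int), Dom_on_diagonals N → Spec_on_diagonals N (on_diagonals N)

-- ===== LEMMAS AND PROOFS =====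

-- B's closed form at flat index 4n+j is the (j+1)-st corner of ring n+2
theorem onDiagCorner_val (n : Nat) (j : Int) (h0 : 0 ≤ j) (h4 : j < 4) :
    onDiagCorner (4*(n:Int)+j) = (2*(n:Int)+3)*(2*(n:Int)+3) - j*(2*(n:Int)+2) := by
  unfold onDiagCorner
  rw [PySem.Int.floordiv_eq_ediv_of_pos (by norm_num),
      PySem.Int.mod_eq_emod_of_pos (by norm_num)]
  have h1 : (4*(n:Int)+j) / 4 = (n:Int) := by omega
  have h2 : (4*(n:Int)+j) % 4 = j := by omega
  dsimp only
  rw [h1, h2]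
  ring

-- A's raw appended list over n+1 rings is four 1s followed by B's flat corner list
theorem onDiag_flat (n : Nat) :
    (PySem.List.pyRange 1 ((n:Int)+2) 1).foldl onDiagStepA [] =
      [1, 1, 1, 1] ++ (PySem.List.pyRange 0 (4*(n:Int)) 1).map onDiagCorner := by
  induction n with
  | zero =>
    rw [show ((0:Nat):Int)+2 = 1+1 by norm_num, PySem.List.pyRange_one_singleton]
    simp [onDiagStepA, PySem.List.pyRange_one_eq_nil]
  | succ n ih =>
    have hpeel : PySem.List.pyRange 1 ((↑(n+1) : Int)+2) 1 =
        PySem.List.pyRange 1 ((n:Int)+2) 1 ++ [(n:Int)+2] := by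
      have := PySem.List.pyRange_one_succ_right (a := 1) (b := (n:Int)+2) (by omega)
      push_cast; push_cast at this; exact this
    have hsplit : PySem.List.pyRange 0 (4*((↑(n+1)) : Int)) 1 =
        PySem.List.pyRange 0 (4*(n:Int)) 1 ++ PySem.List.pyRange (4*(n:Int)) (4*(n:Int)+4) 1 := by
      have := PySem.List.pyRange_one_append (a := 0) (m := 4*(n:Int)) (b := 4*(n:Int)+4)
        (by positivity) (by omega)
      push_cast; push_cast at this
      rw [show 4*((n:Int)+1) = 4*(n:Int)+4 by ring]
      exact this
    have htail : PySem.List.pyRange (4*(n:Int)) (4*(n:Int)+4) 1 =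
        [4*(n:Int), 4*(n:Int)+1, 4*(n:Int)+2, 4*(n:Int)+3] := by
      rw [PySem.List.pyRange_one]
      have h4 : (4*(n:Int)+4 - 4*(n:Int)).toNat = 4 := by omega
      rw [h4]
      simp [List.range_succ]
    rw [hpeel, List.foldl_append, ih, hsplit, List.map_append, htail]
    simp only [List.foldl, onDiagStepA, List.map]
    have c0 := onDiagCorner_val n 0 (by norm_num) (by norm_num)
    have c1 := onDiagCorner_val n 1 (by norm_num) (by norm_num)
    have c2 := onDiagCorner_val n 2 (by norm_num) (by norm_num)
    have c3 := onDiagCorner_val n 3 (by norm_num) (by norm_num)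
    simp only [add_zero] at c0
    rw [c0, c1, c2, c3]
    simp only [List.append_assoc, List.cons_append, List.nil_append]
    simp only [List.cons.injEq, List.append_right_inj]
    and_intros <;> first | trivial | ring

-- deduplication of four leading 1s equals deduplication of a single leading 1
theorem ofList_four_ones (L : List Int) :
    PySem.Set.ofList ([1, 1, 1, 1] ++ L) = PySem.Set.ofList ([1] ++ L) := by
  rw [PySem.Set.ofList_eq_foldl, PySem.Set.ofList_eq_foldl,
      List.foldl_append, List.foldl_append]
  congr 1

-- ===== VERDICT (by name: the statement is the Claim_ definition above) =====
theorem on_diagonals_spec : Claim_equal_on_diagonals := by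
  intro N _
  unfold Spec_on_diagonals on_diagonals on_diagonals_alt
  by_cases h : 1 ≤ N
  · have hN : N = ((N-1).toNat : Int) + 1 := by omega
    rw [hN]
    simp only [show (((N-1).toNat : Int) + 1) + 1 = ((N-1).toNat : Int) + 2 by ring,
               show (((N-1).toNat : Int) + 1) - 1 = ((N-1).toNat : Int) by ring]
    rw [onDiag_flat (N-1).toNat, if_pos (by omega)]
    exact ofList_four_ones _
  · rw [PySem.List.pyRange_one_eq_nil (by omega),
        PySem.List.pyRange_one_eq_nil (by omega), if_neg h]
    rfl
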